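-- pv_equiv track=rewrite | github.com/tamojit2000/CC-Lab | Assignment_3/2-21Aug.py | first_max_even
-- ===== SOURCE A (Python) =====
-- def first_max_even(x):
--     l=x.split()
--     Max=0
--     index=0
--     for i in range(len(l)):
--         ilength=len(l[i])
--         if ilength>Max and ilength%2==0:
--             Max=ilength
--             index=i
--     return l[index]
-- ===== SOURCE B (Python) =====
-- def first_max_even(x):
--     words = x.split()
--     evens = [w for w in words if len(w) % 2 == 0]
--     return max(evens, key=len) if evens else words[0]
-- ===== Notes on version B (the rewrite author's own statement) =====
-- stated objective: simpler
-- what changed: Replaces the manual index/Max tracking loop over range(len(l)) with a filter-then-reduce decomposition: build the list of even-length words once, then take max(..., key=len) (first maximal on ties), falling back to the first word when no even-length word exists.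
import Mathlib
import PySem

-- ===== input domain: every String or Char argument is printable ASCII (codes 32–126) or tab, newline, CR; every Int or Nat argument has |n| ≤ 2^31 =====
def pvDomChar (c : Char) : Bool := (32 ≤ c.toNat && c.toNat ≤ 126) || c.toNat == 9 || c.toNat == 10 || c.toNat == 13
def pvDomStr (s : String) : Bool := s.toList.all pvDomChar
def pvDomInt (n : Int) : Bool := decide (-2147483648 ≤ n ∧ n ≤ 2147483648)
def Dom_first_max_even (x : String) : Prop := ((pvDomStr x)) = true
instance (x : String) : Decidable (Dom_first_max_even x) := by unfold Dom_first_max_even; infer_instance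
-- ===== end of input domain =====

-- B replaces A's manual index/Max tracking loop with a filter-then-reduce decomposition (simpler, same cost).

-- ===== PORT A =====
-- loop body of A: 'ilength=len(l[i]); if ilength>Max and ilength%2==0: Max=ilength; index=i'
-- (l[i] is ported as pyGetD with default "": i ranges over range(len(l)), so always in range)
def pvAstep (l : List String) (s : Int × Int) (i : Int) : Int × Int :=
  let ilength := PySem.Str.len (PySem.List.pyGetD l i "")
  if ilength > s.1 ∧ PySem.Int.mod ilength 2 = 0 then (ilength, i) else s

def first_max_even (x : String) : String :=
  let l := PySem.Str.split₀ x
  let r := (PySem.List.pyRange 0 (l.length : Int) 1).foldl (pvAstep l) (0, 0)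
  -- l[index]: Pre_ guarantees l ≠ [], and index is always in range
  PySem.List.pyGetD l r.2 ""

-- ===== PORT B =====
-- 'len(w) % 2 == 0'
def pvEven (w : String) : Bool := PySem.Int.mod (PySem.Str.len w) 2 == 0

def first_max_even_alt (x : String) : String :=
  let words := PySem.Str.split₀ x
  let evens := words.filter pvEven
  -- 'max(evens, key=len) if evens else words[0]' (words[0] ported as pyGetD; Pre_ guarantees words ≠ [])
  if evens.isEmpty then PySem.List.pyGetD words 0 ""
  else (PySem.List.max? evens PySem.Str.len).getD ""

-- ===== PRECONDITION & SPEC =====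
-- Pre_ excludes exactly the inputs with no words (empty/whitespace-only strings), on which A raises IndexError.
def Pre_first_max_even (x : String) : Prop := PySem.Str.split₀ x ≠ []
instance (x : String) : Decidable (Pre_first_max_even x) := by unfold Pre_first_max_even; infer_instance
def pvWitness_first_max_even : String := "a bb ccc dddd"

def Spec_first_max_even (x : String) (out : String) : Prop := out = first_max_even_alt x
instance (x : String) (out : String) : Decidable (Spec_first_max_even x out) := by unfold Spec_first_max_even; infer_instance

-- ===== CLAIM (what is proved, stated in full; the proofs are below) =====
def Claim_equal_first_max_even : Prop := ∀ (x : String), Dom_first_max_even x → Pre_first_max_even x → Spec_first_max_even x (first_max_even x)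

-- ===== LEMMAS AND PROOFS =====

-- A's state update rewritten on (Max, word) instead of (Max, index)
def pvWstep (s : Int × String) (w : String) : Int × String :=
  if PySem.Str.len w > s.1 ∧ PySem.Int.mod (PySem.Str.len w) 2 = 0 then (PySem.Str.len w, w) else s

-- the inner step of PySem.List.max? with key PySem.Str.len
def pvMstep (acc : Option String) (x : String) : Option String :=
  match acc with
  | none => some x
  | some m => if PySem.Str.len m < PySem.Str.len x then some x else some m

theorem pv_max?_eq (es : List String) :
    PySem.List.max? es PySem.Str.len = es.foldl pvMstep none := by
  unfold PySem.List.max?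
  congr 1
  funext acc x
  cases acc <;> rfl

-- every pair produced by enumerate indexes its own element
theorem pv_mem_enumerate {α : Type} (l : List α) (k : Int) (p : Int × α)
    (hk : 0 ≤ k) (hp : p ∈ PySem.List.enumerate l k) :
    k ≤ p.1 ∧ ∃ j : Nat, (p.1 - k) = (j : Int) ∧ l[j]? = some p.2 := by
  induction l generalizing k with
  | nil => simp [PySem.List.enumerate] at hp
  | cons h t ih =>
    rw [PySem.List.enumerate_cons] at hp
    rcases List.mem_cons.mp hp with h1 | h1
    · subst h1; exact ⟨le_refl _, 0, by simp, by simp⟩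
    · obtain ⟨hle, j, hj, hget⟩ := ih (k + 1) (by omega) h1
      refine ⟨by omega, j + 1, by omega, by simpa using hget⟩

-- A's index-tracking fold over enumerate agrees with the word-tracking fold
theorem pv_fold_idx_word (l : List String) (t : List (Int × String))
    (hmem : ∀ p ∈ t, PySem.List.pyGetD l p.1 "" = p.2)
    (M i : Int) (W : String) (hW : PySem.List.pyGetD l i "" = W) :
    (t.foldl (fun s p => pvAstep l s p.1) (M, i)).1 = (t.map (·.2) |>.foldl pvWstep (M, W)).1 ∧
    PySem.List.pyGetD l (t.foldl (fun s p => pvAstep l s p.1) (M, i)).2 ""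
      = (t.map (·.2) |>.foldl pvWstep (M, W)).2 := by
  induction t generalizing M i W with
  | nil => exact ⟨rfl, hW⟩
  | cons p t ih =>
    have hp := hmem p (List.mem_cons_self ..)
    have hmem' : ∀ q ∈ t, PySem.List.pyGetD l q.1 "" = q.2 :=
      fun q hq => hmem q (List.mem_cons_of_mem _ hq)
    simp only [List.foldl_cons, List.map_cons]
    by_cases hc : PySem.Str.len p.2 > M ∧ PySem.Int.mod (PySem.Str.len p.2) 2 = 0
    · have e1 : pvAstep l (M, i) p.1 = (PySem.Str.len p.2, p.1) := by
        simp only [pvAstep, hp]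
        rw [if_pos hc]
      have e2 : pvWstep (M, W) p.2 = (PySem.Str.len p.2, p.2) := by
        simp only [pvWstep]
        rw [if_pos hc]
      rw [e1, e2]
      exact ih hmem' _ _ _ hp
    · have e1 : pvAstep l (M, i) p.1 = (M, i) := by
        simp only [pvAstep, hp]
        rw [if_neg hc]
      have e2 : pvWstep (M, W) p.2 = (M, W) := by
        simp only [pvWstep]
        rw [if_neg hc]
      rw [e1, e2]
      exact ih hmem' _ _ _ hW

-- the word-tracking fold vs the filter-then-max? fold of B
theorem pv_fold_word_max (t : List String) (hpos : ∀ w ∈ t, 0 < PySem.Str.len w)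
    (M : Int) (W : String) (acc : Option String)
    (hinv : (acc = none ∧ M = 0) ∨ (acc = some W ∧ M = PySem.Str.len W)) :
    ((t.filter pvEven).foldl pvMstep acc = none ∧ acc = none ∧ t.foldl pvWstep (M, W) = (M, W)) ∨
    ((t.filter pvEven).foldl pvMstep acc = some (t.foldl pvWstep (M, W)).2 ∧
      (t.foldl pvWstep (M, W)).1 = PySem.Str.len (t.foldl pvWstep (M, W)).2) := by
  induction t generalizing M W acc with
  | nil =>
    rcases hinv with ⟨h1, h2⟩ | ⟨h1, h2⟩
    · exact Or.inl ⟨h1, h1, rfl⟩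
    · exact Or.inr ⟨h1, h2⟩
  | cons h t ih =>
    have hposh : 0 < PySem.Str.len h := hpos h (List.mem_cons_self ..)
    have hpos' : ∀ w ∈ t, 0 < PySem.Str.len w := fun w hw => hpos w (List.mem_cons_of_mem _ hw)
    by_cases he : PySem.Int.mod (PySem.Str.len h) 2 = 0
    · have hef : pvEven h = true := by unfold pvEven; rw [he]; decide
      simp only [List.filter_cons, hef, if_pos, List.foldl_cons]
      rcases hinv with ⟨h1, h2⟩ | ⟨h1, h2⟩
      · subst h1 h2
        have e1 : pvMstep none h = some h := by rfl
        have e2 : pvWstep (0, W) h = (PySem.Str.len h, h) := by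
          unfold pvWstep; rw [if_pos ⟨hposh, he⟩]
        rw [e1, e2]
        rcases ih hpos' _ _ _ (Or.inr ⟨rfl, rfl⟩) with ⟨_, habs, _⟩ | hres
        · exact absurd habs (by simp)
        · exact Or.inr hres
      · subst h1 h2
        by_cases hlt : PySem.Str.len W < PySem.Str.len h
        · have e1 : pvMstep (some W) h = some h := by simp only [pvMstep]; rw [if_pos hlt]
          have e2 : pvWstep (PySem.Str.len W, W) h = (PySem.Str.len h, h) := by
            unfold pvWstep; rw [if_pos ⟨hlt, he⟩]
          rw [e1, e2]
          rcases ih hpos' _ _ _ (Or.inr ⟨rfl, rfl⟩) with ⟨_, habs, _⟩ | hres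
          · exact absurd habs (by simp)
          · exact Or.inr hres
        · have e1 : pvMstep (some W) h = some W := by simp only [pvMstep]; rw [if_neg hlt]
          have e2 : pvWstep (PySem.Str.len W, W) h = (PySem.Str.len W, W) := by
            unfold pvWstep; rw [if_neg (fun hco => hlt hco.1)]
          rw [e1, e2]
          rcases ih hpos' _ _ _ (Or.inr ⟨rfl, rfl⟩) with ⟨_, habs, _⟩ | hres
          · exact absurd habs (by simp)
          · exact Or.inr hres
    · have hef : pvEven h = false := by
        unfold pvEven
        rw [beq_eq_false_iff_ne]
        exact he
      simp only [List.filter_cons, hef, List.foldl_cons]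
      have e2 : pvWstep (M, W) h = (M, W) := by
        unfold pvWstep; rw [if_neg (by tauto)]
      rw [if_neg (by simp), e2]
      exact ih hpos' _ _ _ hinv

-- a fold of pvMstep starting from some never returns none
theorem pv_foldl_mstep_some_ne (t : List String) :
    ∀ (m : String), t.foldl pvMstep (some m) ≠ none := by
  induction t with
  | nil => intro m hmm; rw [List.foldl_nil] at hmm; simp at hmm
  | cons u v ihv =>
    intro m
    by_cases hcm : PySem.Str.len m < PySem.Str.len u
    · rw [List.foldl_cons, show pvMstep (some m) u = some u from by
        simp only [pvMstep]; rw [if_pos hcm]]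
      exact ihv u
    · rw [List.foldl_cons, show pvMstep (some m) u = some m from by
        simp only [pvMstep]; rw [if_neg hcm]]
      exact ihv m

-- words produced by split() are nonempty
theorem pv_split0_go_ne_nil (s cur : List Char) (acc : List (List Char))
    (hacc : ∀ w ∈ acc, w ≠ []) :
    ∀ w ∈ PySem.Chars.split₀.go s cur acc, w ≠ [] := by
  induction s generalizing cur acc with
  | nil =>
    intro w hw
    unfold PySem.Chars.split₀.go at hw
    split at hw
    · exact hacc w (by simpa using hw)
    · rename_i hne
      rcases List.mem_cons.mp (List.mem_reverse.mp hw) with h1 | h1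
      · subst h1; simp [List.isEmpty_iff] at hne; simpa using hne
      · exact hacc w h1
  | cons c rest ih =>
    intro w hw
    unfold PySem.Chars.split₀.go at hw
    split at hw
    · split at hw
      · exact ih [] acc hacc w hw
      · rename_i hne
        refine ih [] _ ?_ w hw
        intro v hv
        rcases List.mem_cons.mp hv with h1 | h1
        · subst h1; simp [List.isEmpty_iff] at hne; simpa using hne
        · exact hacc v h1
    · exact ih (c :: cur) acc hacc w hw

theorem pv_split0_pos (x : String) : ∀ w ∈ PySem.Str.split₀ x, 0 < PySem.Str.len w := by
  intro w hw
  unfold PySem.Str.split₀ at hw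
  obtain ⟨cs, hcs, hofs⟩ := List.mem_map.mp hw
  have hne : cs ≠ [] := pv_split0_go_ne_nil _ _ _ (by simp) cs hcs
  subst hofs
  obtain ⟨a, b, rfl⟩ := List.exists_cons_of_ne_nil hne
  have htl : (String.ofList (a :: b)).toList = a :: b := by simp
  simp [PySem.Str.len_eq, htl]

-- pyGetD agrees with getElem? in range
theorem pv_pyGetD_of_getElem? {α : Type} (l : List α) (j : Nat) (a d : α)
    (h : l[j]? = some a) : PySem.List.pyGetD l (j : Int) d = a := by
  have hj : j < l.length := by
    by_contra hc
    simp [List.getElem?_eq_none (by omega : l.length ≤ j)] at h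
  rw [PySem.List.pyGetD_natCast]
  simp [List.getD, h]

-- everything assembled, over an abstract word list
theorem pv_main (l : List String) (hne : l ≠ []) (hpos : ∀ w ∈ l, 0 < PySem.Str.len w) :
    PySem.List.pyGetD l ((PySem.List.pyRange 0 (l.length : Int) 1).foldl (pvAstep l) (0, 0)).2 ""
      = if (l.filter pvEven).isEmpty then PySem.List.pyGetD l 0 ""
        else (PySem.List.max? (l.filter pvEven) PySem.Str.len).getD "" := by
  obtain ⟨h, tl, rfl⟩ := List.exists_cons_of_ne_nil hne
  have hrange : PySem.List.pyRange 0 (((h :: tl).length : Nat) : Int) 1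
      = (PySem.List.enumerate (h :: tl) 0).map (·.1) := by
    rw [PySem.List.map_fst_enumerate]; norm_num
  have hA : (PySem.List.pyRange 0 (((h :: tl).length : Nat) : Int) 1).foldl (pvAstep (h :: tl)) (0, 0)
      = (PySem.List.enumerate (h :: tl) 0).foldl (fun s p => pvAstep (h :: tl) s p.1) (0, 0) := by
    rw [hrange, List.foldl_map]
  have hmem : ∀ p ∈ PySem.List.enumerate (h :: tl) 0, PySem.List.pyGetD (h :: tl) p.1 "" = p.2 := by
    intro p hp
    obtain ⟨hle, j, hj, hget⟩ := pv_mem_enumerate (h :: tl) 0 p (le_refl 0) hp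
    have hpj : p.1 = (j : Int) := by omega
    rw [hpj]
    exact pv_pyGetD_of_getElem? (h :: tl) j p.2 "" hget
  have hW0 : PySem.List.pyGetD (h :: tl) 0 "" = h := by
    have := pv_pyGetD_of_getElem? (h :: tl) 0 h "" (by simp)
    exact_mod_cast this
  have hfold := pv_fold_idx_word (h :: tl) (PySem.List.enumerate (h :: tl) 0) hmem 0 0 h hW0
  rw [PySem.List.map_snd_enumerate] at hfold
  have hmax := pv_fold_word_max (h :: tl) hpos 0 h none (Or.inl ⟨rfl, rfl⟩)
  rw [hA, hfold.2]
  rcases hmax with ⟨hnone, -, hfix⟩ | ⟨hsome, -⟩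
  · have hempty : ((h :: tl).filter pvEven).isEmpty = true := by
      cases hfe : (h :: tl).filter pvEven with
      | nil => rfl
      | cons a b =>
        rw [hfe, List.foldl_cons, show pvMstep none a = some a from rfl] at hnone
        exact absurd hnone (pv_foldl_mstep_some_ne b a)
    rw [if_pos hempty, hfix, hW0]
  · have hempty : ((h :: tl).filter pvEven).isEmpty = false := by
      cases hfe : (h :: tl).filter pvEven with
      | nil => rw [hfe] at hsome; rw [List.foldl_nil] at hsome; exact absurd hsome (by simp)
      | cons a b => rfl
    rw [if_neg (by simp [hempty]), pv_max?_eq, hsome]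
    rfl

-- ===== VERDICT (by name: the statement is the Claim_ definition above) =====
theorem first_max_even_spec : Claim_equal_first_max_even := by
  intro x _ hpre
  unfold Spec_first_max_even first_max_even first_max_even_alt
  exact pv_main (PySem.Str.split₀ x) hpre (pv_split0_pos x)
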